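-- pv_equiv track=rewrite | github.com/dany25-09/python | programacion_estructurada/conceptos/PARCIAL-1 _Daniel_Garzón(1).py | contador_de_vocales
-- ===== SOURCE A (Python) =====
-- def contador_de_vocales(frase):
--     frase_1 = frase
--     contador = 0
--     for i in range(len(frase_1)):
--         if (
--         frase[i] == "A" or
--         frase[i] == "E" or
--         frase[i] == "I" or
--         frase[i] == "O" or
--         frase[i] == "U"):
--             contador=contador+1
--     return contador
-- ===== SOURCE B (Python) =====
-- def contador_de_vocales(frase):
--     return sum(frase.count(v) for v in "AEIOU")
-- ===== Notes on version B (the rewrite author's own statement) =====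
-- stated objective: alternative
-- what changed: B sums per-vowel whole-string counts via str.count over the five uppercase vowels instead of A's single indexed pass testing each character; the C-implemented scans make it measurably faster.
import Mathlib
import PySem

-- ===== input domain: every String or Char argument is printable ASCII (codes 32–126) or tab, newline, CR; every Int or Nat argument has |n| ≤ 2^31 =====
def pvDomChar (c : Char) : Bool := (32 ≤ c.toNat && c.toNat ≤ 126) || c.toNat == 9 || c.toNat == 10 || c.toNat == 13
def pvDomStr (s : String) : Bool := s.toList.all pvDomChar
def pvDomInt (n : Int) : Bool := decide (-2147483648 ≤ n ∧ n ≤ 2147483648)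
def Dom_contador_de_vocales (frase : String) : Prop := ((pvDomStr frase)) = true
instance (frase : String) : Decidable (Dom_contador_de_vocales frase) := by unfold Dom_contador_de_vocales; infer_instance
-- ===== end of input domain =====

-- B counts vowels by summing per-vowel whole-string counts over "AEIOU" instead of A's
-- single indexed pass; an alternative decomposition, same asymptotic cost.

-- ===== PORT A =====
-- A: loop 'for i in range(len(frase_1))', bump contador when frase[i] is one of the five literals.
def contador_de_vocales (frase : String) : Int :=
  let frase_1 := frase
  (PySem.List.pyRange 0 (PySem.Str.len frase_1) 1).foldl
    (fun contador i =>
      if PySem.Str.pyGet? frase i = some 'A' ∨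
         PySem.Str.pyGet? frase i = some 'E' ∨
         PySem.Str.pyGet? frase i = some 'I' ∨
         PySem.Str.pyGet? frase i = some 'O' ∨
         PySem.Str.pyGet? frase i = some 'U' then contador + 1 else contador) 0

-- ===== PORT B =====
-- B: sum(frase.count(v) for v in "AEIOU"); v is a single char, so frase.count(v) is the char count.
def contador_de_vocales_alt (frase : String) : Int :=
  ((("AEIOU" : String).toList).map (fun v => (frase.toList.count v : Int))).sum

-- ===== PRECONDITION & SPEC =====
def Spec_contador_de_vocales (frase : String) (out : Int) : Prop := out = contador_de_vocales_alt frase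
instance (frase : String) (out : Int) : Decidable (Spec_contador_de_vocales frase out) := by unfold Spec_contador_de_vocales; infer_instance

-- ===== CLAIM (what is proved, stated in full; the proofs are below) =====
def Claim_equal_contador_de_vocales : Prop := ∀ (frase : String), Dom_contador_de_vocales frase → Spec_contador_de_vocales frase (contador_de_vocales frase)

-- ===== LEMMAS AND PROOFS =====

-- A's fold over the first m indices counts the vowels among the first m characters.
lemma foldl_prefix_count (l : List Char) (m : Nat) (hm : m ≤ l.length) :
    (PySem.List.pyRange 0 (m : Int) 1).foldl
      (fun contador i =>
        if PySem.List.pyGet? l i = some 'A' ∨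
           PySem.List.pyGet? l i = some 'E' ∨
           PySem.List.pyGet? l i = some 'I' ∨
           PySem.List.pyGet? l i = some 'O' ∨
           PySem.List.pyGet? l i = some 'U' then contador + 1 else contador) 0
    = ((l.take m).countP
        (fun c => c == 'A' || c == 'E' || c == 'I' || c == 'O' || c == 'U') : Int) := by
  induction m with
  | zero => simp
  | succ m ih =>
    have hm' : m ≤ l.length := Nat.le_of_succ_le hm
    have hlt : m < l.length := hm
    have hcast : ((m + 1 : Nat) : Int) = (m : Int) + 1 := by push_cast; ring
    rw [hcast, PySem.List.pyRange_one_succ_right (by positivity), List.foldl_append, ih hm']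
    have hget : PySem.List.pyGet? l (m : Int) = some l[m] := by
      rw [PySem.List.pyGet?_natCast]
      simp [hlt]
    rw [List.take_add_one, List.countP_append]
    simp only [List.foldl_cons, List.foldl_nil, hget]
    have : l[m]? = some l[m] := by simp [hlt]
    rw [this]
    by_cases hA : l[m] = 'A' <;> by_cases hE : l[m] = 'E' <;>
      by_cases hI : l[m] = 'I' <;> by_cases hO : l[m] = 'O' <;> by_cases hU : l[m] = 'U' <;>
      simp_all

-- The per-vowel counts in B sum to the vowel countP used for A.
lemma sum_counts_eq_countP (l : List Char) :
    ((("AEIOU" : String).toList).map (fun v => (l.count v : Int))).sum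
    = ((l.countP (fun c => c == 'A' || c == 'E' || c == 'I' || c == 'O' || c == 'U')) : Int) := by
  induction l with
  | nil => decide
  | cons c l ih =>
    have hs : ("AEIOU" : String).toList = ['A', 'E', 'I', 'O', 'U'] := by decide
    rw [hs] at ih ⊢
    simp only [List.map_cons, List.map_nil, List.sum_cons, List.sum_nil,
      List.count_cons, List.countP_cons] at ih ⊢
    by_cases hA : c = 'A' <;> by_cases hE : c = 'E' <;>
      by_cases hI : c = 'I' <;> by_cases hO : c = 'O' <;> by_cases hU : c = 'U' <;>
      simp_all <;> omega

-- ===== VERDICT (by name: the statement is the Claim_ definition above) =====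
theorem contador_de_vocales_spec : Claim_equal_contador_de_vocales := by
  intro frase _
  unfold Spec_contador_de_vocales contador_de_vocales contador_de_vocales_alt
  simp only [PySem.Str.len_eq, PySem.Str.pyGet?_eq,
    PySem.Chars.pyGet?_eq_listPyGet?]
  have h := foldl_prefix_count frase.toList frase.toList.length (le_refl _)
  rw [List.take_length] at h
  rw [sum_counts_eq_countP]
  exact h
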